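/- GENERATED by farm/mkstatement.py from design/units.tsv (unit `GifAddExtensionBlock.3`) and the assertions of Gif/Spec/Seg_GifAddExtensionBlock.lean — do not edit.
   THE STATEMENT of the proof unit `GifAddExtensionBlock.3`: segment 3 of `GifAddExtensionBlock` (14 instructions; entries 0x107c05;
   exits 0x107c4d; ranges 0x107c05-0x107c24,0x107c5c-0x107c6a)
   takes each of its entry assertions to one of its exit assertions (`Gif.Spec.GifAddExtensionBlock.Seg3`), given the contracts of its callees.
   What the names mean: ProgX/Base/Spec/Basic.lean (the shared hypotheses), Gif/Spec/Seg_GifAddExtensionBlock.lean (the assertions). The theorem to prove: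
   `theorem GifAddExtensionBlock_3_ok : Gif.Spec.GifAddExtensionBlock_3.Statement`. -/
import Gif.Code
import Gif.Dec.All
import Gif.Labels
import Gif.Spec.Seg_GifAddExtensionBlock
import ProgX.Base.Spec.Libc
namespace Gif.Spec.GifAddExtensionBlock_3
open X86 X86.User Asan

/-- The statement of unit `GifAddExtensionBlock.3`. -/
def Statement : Prop :=
  ∀ (Lay : Layout) (_hLay : Lay.hi = 0x1000000) (μ : Microarch) (_hμ : UserX.MicroOK μ) (u₀ : State)
    (_hcode : HasCodeNat Lay u₀ Gif.L.GifAddExtensionBlock.entry Gif.Code.code_GifAddExtensionBlock.nat Gif.L.GifAddExtensionBlock.size)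
    (_h_memcpy : ∀ (others : List Obj) (frames : List (Nat × FrameLayout)), Calls Lay μ ProgX.Base.WayInv (ProgX.Base.conv u₀) ProgX.Base.L.memcpy.entry (ProgX.Base.Spec.memcpy.spec others frames)),
    Gif.Spec.GifAddExtensionBlock.Seg3 Lay μ u₀

end Gif.Spec.GifAddExtensionBlock_3
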